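-- pv_equiv track=rewrite | github.com/yeseongcho/- | 프로그래밍1/Divide and Conquer.py | comp_MaxMR
-- ===== SOURCE A (Python) =====
-- def comp_MaxMR(low, high, X) :
--     sum = 0
--     MaxMR = 0
--     for i in range(low, high+1) :
--         sum = sum + X[i]
--         if sum > MaxMR :
--             MaxMR = sum
--     return MaxMR
-- ===== SOURCE B (Python) =====
-- def comp_MaxMR(low, high, X):
--     # divide-and-conquer: a prefix of X[low..high] either lies entirely in the
--     # left half, or covers the whole left half plus a prefix of the right half
--     if low > high:
--         return 0
--     if low == high:
--         return max(0, X[low])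
--     mid = (low + high) // 2
--     left_best = comp_MaxMR(low, mid, X)
--     left_sum = 0
--     for i in range(low, mid + 1):
--         left_sum += X[i]
--     right_best = comp_MaxMR(mid + 1, high, X)
--     return max(left_best, left_sum + right_best)
-- ===== Notes on version B (the rewrite author's own statement) =====
-- stated objective: alternative
-- what changed: Replaces A's single linear accumulate-and-track-max loop by a divide-and-conquer recursion on the index range: split at the midpoint and combine as max(left_best, left_sum + right_best), correct because a maximal prefix either stays in the left half or spans it entirely plus a prefix of the right half.
import Mathlib
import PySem

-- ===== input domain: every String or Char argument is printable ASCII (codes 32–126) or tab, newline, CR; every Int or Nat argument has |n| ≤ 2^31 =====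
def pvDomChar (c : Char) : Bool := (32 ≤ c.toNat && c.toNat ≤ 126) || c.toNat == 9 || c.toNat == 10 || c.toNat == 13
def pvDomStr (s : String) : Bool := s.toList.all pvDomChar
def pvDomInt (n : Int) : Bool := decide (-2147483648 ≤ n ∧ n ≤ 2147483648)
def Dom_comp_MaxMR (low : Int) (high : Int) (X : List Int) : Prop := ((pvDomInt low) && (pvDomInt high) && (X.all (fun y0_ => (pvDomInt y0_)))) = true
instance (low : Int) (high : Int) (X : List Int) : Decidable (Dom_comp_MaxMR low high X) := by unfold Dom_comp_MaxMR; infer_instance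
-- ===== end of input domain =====

-- B replaces A's single accumulate-and-track-max loop by a divide-and-conquer recursion
-- on the index range (split at the midpoint, combine with max(left, left_sum + right)); alternative decomposition, same result.

-- ===== PORT A =====
def comp_MaxMR (low : Int) (high : Int) (X : List Int) : Int :=
  (((PySem.List.pyRange low (high + 1) 1).foldl
      (fun (st : Int × Int) i =>
        let sum := st.1 + PySem.List.pyGetD X i 0
        (sum, if sum > st.2 then sum else st.2))
      (0, 0))).2

-- ===== PORT B =====
def comp_MaxMR_alt (low : Int) (high : Int) (X : List Int) : Int :=
  if low > high then 0
  else if low == high then max 0 (PySem.List.pyGetD X low 0)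
  else
    let mid := PySem.Int.floordiv (low + high) 2
    let left_best := comp_MaxMR_alt low mid X
    let left_sum := (PySem.List.pyRange low (mid + 1) 1).foldl
        (fun s i => s + PySem.List.pyGetD X i 0) 0
    let right_best := comp_MaxMR_alt (mid + 1) high X
    max left_best (left_sum + right_best)
termination_by (high - low).toNat
decreasing_by
  all_goals
    rename_i hgt hne
    rw [beq_iff_eq] at hne
    have hlow : low < high := by omega
    have hb := PySem.Int.floordiv_two_mid_bounds (lo := low) (hi := high) (le_of_lt hlow)
    have hlt : PySem.Int.floordiv (low + high) 2 < high := by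
      rw [PySem.Int.floordiv_lt_iff_lt_mul (by omega)]; omega
    omega

-- ===== PRECONDITION & SPEC =====
-- Pre_ excludes exactly the inputs where Python A raises IndexError: some index in
-- range(low, high+1) is outside [-len(X), len(X)).  (Negative in-range indices wrap, as in Python.)
def Pre_comp_MaxMR (low : Int) (high : Int) (X : List Int) : Prop :=
  high < low ∨ (-(X.length : Int) ≤ low ∧ high < (X.length : Int))
instance (low : Int) (high : Int) (X : List Int) : Decidable (Pre_comp_MaxMR low high X) := by
  unfold Pre_comp_MaxMR; infer_instance
def pvWitness_comp_MaxMR : Int × Int × List Int := (1, 3, [2, -1, 3, -2, 4])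

def Spec_comp_MaxMR (low : Int) (high : Int) (X : List Int) (out : Int) : Prop := out = comp_MaxMR_alt low high X
instance (low : Int) (high : Int) (X : List Int) (out : Int) : Decidable (Spec_comp_MaxMR low high X out) := by unfold Spec_comp_MaxMR; infer_instance

-- ===== CLAIM (what is proved, stated in full; the proofs are below) =====
def Claim_equal_comp_MaxMR : Prop := ∀ (low : Int) (high : Int) (X : List Int), Dom_comp_MaxMR low high X → Pre_comp_MaxMR low high X → Spec_comp_MaxMR low high X (comp_MaxMR low high X)

-- ===== LEMMAS AND PROOFS =====

/-- The running prefix sums of `vs` starting from accumulated sum `s`. -/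
def prefSums (s : Int) : List Int → List Int
  | [] => []
  | v :: vs => (s + v) :: prefSums (s + v) vs

/-- max(0, all running prefix sums of `l`) — the value both programs compute. -/
def bestPref (l : List Int) : Int := (prefSums 0 l).foldl max 0

def valsOf (low high : Int) (X : List Int) : List Int :=
  (PySem.List.pyRange low (high + 1) 1).map (fun i => PySem.List.pyGetD X i 0)

theorem foldA_eq_foldl_max (g : Int → Int) (is : List Int) (s m : Int) :
    (is.foldl (fun (st : Int × Int) i =>
        let sum := st.1 + g i
        (sum, if sum > st.2 then sum else st.2)) (s, m)).2
      = (prefSums s (is.map g)).foldl max m := by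
  induction is generalizing s m with
  | nil => rfl
  | cons i is ih =>
    simp only [List.foldl_cons, List.map_cons, prefSums]
    rw [ih]
    congr 1
    by_cases h : s + g i > m
    · rw [if_pos h, max_eq_right h.le]
    · rw [if_neg h, max_eq_left (by omega)]

theorem prefSums_append (u v : List Int) (s : Int) :
    prefSums s (u ++ v) = prefSums s u ++ prefSums (s + u.sum) v := by
  induction u generalizing s with
  | nil => simp [prefSums]
  | cons x u ih => simp [prefSums, ih, add_assoc]

theorem prefSums_shift (l : List Int) (a b : Int) :
    prefSums (a + b) l = (prefSums b l).map (fun x => a + x) := by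
  induction l generalizing b with
  | nil => rfl
  | cons v vs ih =>
    simp only [prefSums, List.map_cons]
    rw [add_assoc, ih]

theorem foldl_max_pull (l : List Int) (a b : Int) :
    l.foldl max (max a b) = max a (l.foldl max b) := by
  induction l generalizing b with
  | nil => rfl
  | cons x t ih => simp only [List.foldl_cons, max_assoc, ih]

theorem foldl_max_map_add (l : List Int) (c m : Int) :
    (l.map (fun x => c + x)).foldl max (c + m) = c + l.foldl max m := by
  induction l generalizing m with
  | nil => rfl
  | cons x t ih =>
    simp only [List.map_cons, List.foldl_cons, ← ih]
    congr 1
    omega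

theorem sum_le_foldl_max (l : List Int) (s m : Int) (h : s ≤ m) :
    s + l.sum ≤ (prefSums s l).foldl max m := by
  induction l generalizing s m with
  | nil => simp only [prefSums, List.sum_nil, List.foldl_nil]; omega
  | cons v vs ih =>
    simp only [prefSums, List.foldl_cons, List.sum_cons, ← add_assoc]
    exact ih (s + v) (max m (s + v)) (le_max_right _ _)

theorem bestPref_append (u v : List Int) :
    bestPref (u ++ v) = max (bestPref u) (u.sum + bestPref v) := by
  unfold bestPref
  rw [prefSums_append, List.foldl_append, zero_add]
  have hshift : prefSums u.sum v = (prefSums 0 v).map (fun x => u.sum + x) := by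
    simpa using prefSums_shift v u.sum 0
  have hsum : u.sum ≤ (prefSums 0 u).foldl max 0 := by
    simpa using sum_le_foldl_max u 0 0 le_rfl
  have hstart : (prefSums 0 u).foldl max 0 = max ((prefSums 0 u).foldl max 0) u.sum :=
    (max_eq_left hsum).symm
  rw [hshift, hstart, foldl_max_pull]
  congr 1
  have := foldl_max_map_add (prefSums 0 v) u.sum 0
  simpa using this

theorem foldl_add_eq_sum_map (g : Int → Int) (is : List Int) (s : Int) :
    is.foldl (fun acc i => acc + g i) s = s + (is.map g).sum := by
  induction is generalizing s with
  | nil => simp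
  | cons i t ih => simp [ih, add_assoc]

theorem alt_eq_bestPref (low high : Int) (X : List Int) :
    comp_MaxMR_alt low high X = bestPref (valsOf low high X) := by
  induction low, high using comp_MaxMR_alt.induct with
  | X => exact X
  | case1 low high h =>
    rw [comp_MaxMR_alt, if_pos h]
    rw [valsOf, PySem.List.pyRange_one_eq_nil (by omega)]
    rfl
  | case2 low high h he =>
    rw [comp_MaxMR_alt, if_neg h, if_pos he]
    have heq : low = high := by simpa using he
    subst heq
    rw [valsOf, PySem.List.pyRange_one_singleton]
    simp [bestPref, prefSums]
  | case3 low high h he mid ihl ihr ihr2 =>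
    have hm : mid = PySem.Int.floordiv (low + high) 2 := rfl
    rw [comp_MaxMR_alt]
    simp only [if_neg h, if_neg he]
    rw [← hm] at *
    have hne : low ≠ high := by simpa using he
    have hlh : low < high := by omega
    have hb : low ≤ mid ∧ mid ≤ high := hm ▸ PySem.Int.floordiv_two_mid_bounds (lo := low) (hi := high) (le_of_lt hlh)
    have hlt : mid < high := by
      rw [hm, PySem.Int.floordiv_lt_iff_lt_mul (by omega)]; omega
    have hsplit : valsOf low high X
        = valsOf low mid X ++ valsOf (mid + 1) high X := by
      unfold valsOf
      rw [← List.map_append,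
        ← PySem.List.pyRange_one_append low (mid + 1) (high + 1) (by omega) (by omega)]
    rw [hsplit, bestPref_append, ihl, ihr2]
    congr 2
    rw [foldl_add_eq_sum_map]
    simp [valsOf]

-- ===== VERDICT (by name: the statement is the Claim_ definition above) =====
theorem comp_MaxMR_spec : Claim_equal_comp_MaxMR := by
  intro low high X _ _
  unfold Spec_comp_MaxMR comp_MaxMR
  rw [foldA_eq_foldl_max, alt_eq_bestPref]
  rfl
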